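-- pv_equiv track=rewrite | github.com/pizilber/GNMR | Matrix completion/Python/GNMR_completion.py | generate_sparse_matrix_entries
-- ===== SOURCE A (Python) =====
-- def generate_sparse_matrix_entries(omega, rank, n1, n2):
--     row_entries = []
--     columns_entries = []
--     row = 0
--     for j in range(n1):
--         for k in range(n2):
--             if 0 != omega[j][k]:
--                 # add indices for U entries
--                 for l in range(rank):
--                     columns_entries.append(k * rank + l)
--                     row_entries.append(row)
--                 # add indices for V entries
--                 for l in range(rank):
--                     columns_entries.append((n2 + j) * rank + l)
--                     row_entries.append(row)
--                 row += 1
--     return row_entries, columns_entries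
-- ===== SOURCE B (Python) =====
-- def generate_sparse_matrix_entries(omega, rank, n1, n2):
--     # Counts nonzeros once, then computes row_entries by closed-form floor division on a
--     # flat index and columns_entries by arithmetically decoding one 2*rank-wide offset,
--     # eliminating A's running row counter and its four append loops.
--     m = sum(1 for j in range(n1) for k in range(n2) if omega[j][k] != 0)
--     row_entries = [i // (2 * rank) for i in range(2 * rank * m)]
--     columns_entries = [(k if l < rank else n2 + j) * rank + l % rank
--                        for j in range(n1) for k in range(n2) if omega[j][k] != 0
--                        for l in range(2 * rank)]
--     return row_entries, columns_entries
-- ===== Notes on version B (the rewrite author's own statement) =====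
-- stated objective: alternative
-- what changed: B replaces A's fused scan with running row counter and four append loops by closed-form arithmetic: it counts the nonzeros once, produces row_entries by floor-dividing a flat index range by 2*rank, and produces columns_entries by decoding a single 2*rank-wide offset l with a conditional and l % rank instead of two separate inner loops.
import Mathlib
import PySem

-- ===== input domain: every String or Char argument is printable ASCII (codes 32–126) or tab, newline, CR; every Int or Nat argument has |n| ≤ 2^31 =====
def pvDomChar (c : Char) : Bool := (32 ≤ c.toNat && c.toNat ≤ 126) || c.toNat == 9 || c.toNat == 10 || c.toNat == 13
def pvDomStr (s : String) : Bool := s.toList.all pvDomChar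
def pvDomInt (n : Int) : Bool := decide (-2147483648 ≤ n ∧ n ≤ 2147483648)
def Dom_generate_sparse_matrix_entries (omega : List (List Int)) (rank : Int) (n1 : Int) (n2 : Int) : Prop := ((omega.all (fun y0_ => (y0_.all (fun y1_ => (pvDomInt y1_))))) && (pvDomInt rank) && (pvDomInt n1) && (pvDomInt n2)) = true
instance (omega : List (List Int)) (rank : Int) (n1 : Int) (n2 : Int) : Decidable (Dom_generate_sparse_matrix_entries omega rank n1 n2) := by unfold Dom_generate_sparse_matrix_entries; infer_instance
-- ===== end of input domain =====

-- B drops A's running row counter and append loops: it counts the nonzeros once, derives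
-- row_entries in closed form by floor-dividing a flat index by 2*rank, and decodes each
-- column index arithmetically from a single 2*rank-wide offset; same cost, different algorithm.

-- ===== PORT A =====
def generate_sparse_matrix_entries (omega : List (List Int)) (rank : Int) (n1 : Int) (n2 : Int) : List Int × List Int :=
  -- state = (row_entries, columns_entries, row); omega[j][k] via pyGetD (in range under Pre_)
  let st : List Int × List Int × Int :=
    (PySem.List.pyRange 0 n1 1).foldl (fun st j =>
      (PySem.List.pyRange 0 n2 1).foldl (fun (st : List Int × List Int × Int) k =>
        if (0 : Int) ≠ PySem.List.pyGetD (PySem.List.pyGetD omega j []) k 0 then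
          let s1 := (PySem.List.pyRange 0 rank 1).foldl
            (fun (s : List Int × List Int × Int) l => (s.1 ++ [s.2.2], s.2.1 ++ [k * rank + l], s.2.2)) st
          let s2 := (PySem.List.pyRange 0 rank 1).foldl
            (fun (s : List Int × List Int × Int) l => (s.1 ++ [s.2.2], s.2.1 ++ [(n2 + j) * rank + l], s.2.2)) s1
          (s2.1, s2.2.1, s2.2.2 + 1)
        else st) st) ([], [], 0)
  (st.1, st.2.1)

-- ===== PORT B =====
def generate_sparse_matrix_entries_alt (omega : List (List Int)) (rank : Int) (n1 : Int) (n2 : Int) : List Int × List Int :=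
  -- m = sum(1 for j … for k … if omega[j][k] != 0)
  let m : Int :=
    (PySem.List.pyRange 0 n1 1).foldl (fun acc j =>
      (PySem.List.pyRange 0 n2 1).foldl (fun (acc : Int) k =>
        if PySem.List.pyGetD (PySem.List.pyGetD omega j []) k 0 != 0 then acc + 1 else acc) acc) 0
  -- row_entries = [i // (2*rank) for i in range(2*rank*m)]
  let row_entries : List Int :=
    (PySem.List.pyRange 0 (2 * rank * m) 1).map (fun i => PySem.Int.floordiv i (2 * rank))
  -- columns_entries = [(k if l < rank else n2+j)*rank + l % rank for j … for k … if … for l in range(2*rank)]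
  let columns_entries : List Int :=
    (PySem.List.pyRange 0 n1 1).flatMap (fun j =>
      ((PySem.List.pyRange 0 n2 1).filter
          (fun k => PySem.List.pyGetD (PySem.List.pyGetD omega j []) k 0 != 0)).flatMap
        (fun k => (PySem.List.pyRange 0 (2 * rank) 1).map
          (fun l => (if l < rank then k else n2 + j) * rank + PySem.Int.mod l rank)))
  (row_entries, columns_entries)

-- ===== PRECONDITION & SPEC =====
-- Pre_ excludes exactly the inputs on which A raises IndexError: when both loop ranges are
-- nonempty, omega must have at least n1 rows and each of the first n1 rows at least n2 entries.
def Pre_generate_sparse_matrix_entries (omega : List (List Int)) (rank : Int) (n1 : Int) (n2 : Int) : Prop :=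
  n1 ≤ 0 ∨ n2 ≤ 0 ∨ (n1 ≤ (omega.length : Int) ∧ ∀ r ∈ omega.take n1.toNat, n2 ≤ (r.length : Int))
instance (omega : List (List Int)) (rank : Int) (n1 : Int) (n2 : Int) : Decidable (Pre_generate_sparse_matrix_entries omega rank n1 n2) := by unfold Pre_generate_sparse_matrix_entries; infer_instance

def pvWitness_generate_sparse_matrix_entries : List (List Int) × Int × Int × Int := ([[1, 0], [0, 2]], 2, 2, 2)

def Spec_generate_sparse_matrix_entries (omega : List (List Int)) (rank : Int) (n1 : Int) (n2 : Int) (out : List Int × List Int) : Prop := out = generate_sparse_matrix_entries_alt omega rank n1 n2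
instance (omega : List (List Int)) (rank : Int) (n1 : Int) (n2 : Int) (out : List Int × List Int) : Decidable (Spec_generate_sparse_matrix_entries omega rank n1 n2 out) := by unfold Spec_generate_sparse_matrix_entries; infer_instance

-- ===== CLAIM (what is proved, stated in full; the proofs are below) =====
def Claim_equal_generate_sparse_matrix_entries : Prop := ∀ (omega : List (List Int)) (rank : Int) (n1 : Int) (n2 : Int), Dom_generate_sparse_matrix_entries omega rank n1 n2 → Pre_generate_sparse_matrix_entries omega rank n1 n2 → Spec_generate_sparse_matrix_entries omega rank n1 n2 (generate_sparse_matrix_entries omega rank n1 n2)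

-- ===== LEMMAS AND PROOFS =====

-- the column-index block A appends for one nonzero cell (j, k)
def pvBlockA (rank n2 : Int) (jk : Int × Int) : List Int :=
  PySem.List.pyRange (jk.2 * rank) (jk.2 * rank + rank) 1 ++
  PySem.List.pyRange ((n2 + jk.1) * rank) ((n2 + jk.1) * rank + rank) 1

-- the row-index block A appends for one nonzero cell
def pvTwoRep (rank : Int) (x : Int) : List Int :=
  List.replicate rank.toNat x ++ List.replicate rank.toNat x

-- step of A's per-nonzero-cell work, in closed form
def pvStepF (rank n2 : Int) (st : List Int × List Int × Int) (jk : Int × Int) : List Int × List Int × Int :=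
  (st.1 ++ pvTwoRep rank st.2.2, st.2.1 ++ pvBlockA rank n2 jk, st.2.2 + 1)

lemma pv_lloop_nat (n : Nat) (a : Int) (r c : List Int) (row : Int) :
    (List.range n).foldl
      (fun (s : List Int × List Int × Int) (l : Nat) => (s.1 ++ [s.2.2], s.2.1 ++ [a + (l : Int)], s.2.2)) (r, c, row)
    = (r ++ List.replicate n row, c ++ (List.range n).map (fun l => a + (l : Int)), row) := by
  induction n with
  | zero => simp
  | succ m ih =>
    rw [List.range_succ, List.foldl_append, ih]
    simp [List.replicate_succ']

lemma pv_lloop (rank a : Int) (r c : List Int) (row : Int) :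
    (PySem.List.pyRange 0 rank 1).foldl
      (fun (s : List Int × List Int × Int) l => (s.1 ++ [s.2.2], s.2.1 ++ [a + l], s.2.2)) (r, c, row)
    = (r ++ List.replicate rank.toNat row, c ++ PySem.List.pyRange a (a + rank) 1, row) := by
  rw [PySem.List.pyRange_one, List.foldl_map]
  simp only [zero_add, Int.sub_zero]
  rw [pv_lloop_nat, PySem.List.pyRange_one a (a + rank)]
  simp [List.pure_def, List.bind_eq_flatMap, ← List.map_eq_flatMap, List.map_map, add_sub_cancel_left]

lemma pv_body_eq (rank n2 j k : Int) (st : List Int × List Int × Int) :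
    (let s1 := (PySem.List.pyRange 0 rank 1).foldl
        (fun (s : List Int × List Int × Int) l => (s.1 ++ [s.2.2], s.2.1 ++ [k * rank + l], s.2.2)) st
     let s2 := (PySem.List.pyRange 0 rank 1).foldl
        (fun (s : List Int × List Int × Int) l => (s.1 ++ [s.2.2], s.2.1 ++ [(n2 + j) * rank + l], s.2.2)) s1
     ((s2.1, s2.2.1, s2.2.2 + 1) : List Int × List Int × Int))
    = pvStepF rank n2 st (j, k) := by
  obtain ⟨r, c, row⟩ := st
  simp only [pv_lloop, pvStepF, pvTwoRep, pvBlockA, List.append_assoc]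

lemma pv_foldl_flatMap {α β γ : Type} (l : List α) (g : α → List β) (f : γ → β → γ) (init : γ) :
    (l.flatMap g).foldl f init = l.foldl (fun acc x => (g x).foldl f acc) init := by
  induction l generalizing init with
  | nil => simp
  | cons x xs ih => simp [List.flatMap_cons, List.foldl_append, ih]

-- A's double loop, rewritten as a fold of pvStepF over the materialized nonzero coordinates
lemma pv_A_eq_coords_fold (omega : List (List Int)) (rank n1 n2 : Int) :
    ((PySem.List.pyRange 0 n1 1).foldl (fun st j =>
      (PySem.List.pyRange 0 n2 1).foldl (fun (st : List Int × List Int × Int) k =>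
        if (0 : Int) ≠ PySem.List.pyGetD (PySem.List.pyGetD omega j []) k 0 then
          let s1 := (PySem.List.pyRange 0 rank 1).foldl
            (fun (s : List Int × List Int × Int) l => (s.1 ++ [s.2.2], s.2.1 ++ [k * rank + l], s.2.2)) st
          let s2 := (PySem.List.pyRange 0 rank 1).foldl
            (fun (s : List Int × List Int × Int) l => (s.1 ++ [s.2.2], s.2.1 ++ [(n2 + j) * rank + l], s.2.2)) s1
          (s2.1, s2.2.1, s2.2.2 + 1)
        else st) st) ([], [], 0))
    = ((PySem.List.pyRange 0 n1 1).flatMap (fun j =>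
        ((PySem.List.pyRange 0 n2 1).filter
            (fun k => PySem.List.pyGetD (PySem.List.pyGetD omega j []) k 0 != 0)).map
          (fun k => (j, k)))).foldl (pvStepF rank n2) ([], [], 0) := by
  rw [pv_foldl_flatMap]
  apply PySem.List.foldl_congr_mem
  intro st j _
  rw [List.foldl_map]
  have hb : (fun (st : List Int × List Int × Int) (k : Int) =>
        if (0 : Int) ≠ PySem.List.pyGetD (PySem.List.pyGetD omega j []) k 0 then
          let s1 := (PySem.List.pyRange 0 rank 1).foldl
            (fun (s : List Int × List Int × Int) l => (s.1 ++ [s.2.2], s.2.1 ++ [k * rank + l], s.2.2)) st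
          let s2 := (PySem.List.pyRange 0 rank 1).foldl
            (fun (s : List Int × List Int × Int) l => (s.1 ++ [s.2.2], s.2.1 ++ [(n2 + j) * rank + l], s.2.2)) s1
          (s2.1, s2.2.1, s2.2.2 + 1)
        else st)
      = (fun (st : List Int × List Int × Int) (k : Int) =>
        if PySem.List.pyGetD (PySem.List.pyGetD omega j []) k 0 != 0 then
          pvStepF rank n2 st (j, k) else st) := by
    funext st' k
    by_cases h : PySem.List.pyGetD (PySem.List.pyGetD omega j []) k 0 = 0
    · simp [h]
    · rw [if_pos (Ne.symm h), if_pos (by simp [h])]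
      exact pv_body_eq rank n2 j k st'
  rw [hb]
  rw [PySem.List.foldl_if_eq_foldl_filter
        (p := fun k => PySem.List.pyGetD (PySem.List.pyGetD omega j []) k 0 != 0)
        (f := fun st k => pvStepF rank n2 st (j, k))]

-- closed form of the pvStepF fold
lemma pv_fold_stepF (rank n2 : Int) (cs : List (Int × Int)) (r c : List Int) (row : Int) :
    cs.foldl (pvStepF rank n2) (r, c, row)
    = (r ++ (List.range cs.length).flatMap (fun (q : Nat) => pvTwoRep rank (row + (q : Int))),
       c ++ cs.flatMap (pvBlockA rank n2),
       row + (cs.length : Int)) := by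
  induction cs generalizing r c row with
  | nil => simp
  | cons jk tl ih =>
    rw [List.foldl_cons]
    show (tl.foldl (pvStepF rank n2) (r ++ pvTwoRep rank row, c ++ pvBlockA rank n2 jk, row + 1)) = _
    rw [ih]
    refine Prod.ext ?_ (Prod.ext ?_ ?_) <;> simp only
    · rw [List.append_assoc]
      congr 1
      rw [List.length_cons, List.range_succ_eq_map, List.flatMap_cons, List.flatMap_map]
      congr 1
      · simp [pvTwoRep]
      · apply List.flatMap_congr
        intro q _
        show pvTwoRep rank (row + 1 + (q : Int)) = pvTwoRep rank (row + ((q + 1 : Nat) : Int))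
        congr 1
        push_cast
        ring
    · rw [List.flatMap_cons, List.append_assoc]
    · simp only [List.length_cons]
      push_cast
      ring

-- B's count fold equals the number of nonzero coordinates
lemma pv_sumlen {α : Type} (js : List Int) (F : Int → List α) (acc : Int) :
    js.foldl (fun a j => a + ((F j).length : Int)) acc = acc + (((js.flatMap F).length : Nat) : Int) := by
  induction js generalizing acc with
  | nil => simp
  | cons j tl ih =>
    rw [List.foldl_cons, ih, List.flatMap_cons, List.length_append]
    push_cast
    ring

lemma pv_count (omega : List (List Int)) (n1 n2 : Int) :
    ((PySem.List.pyRange 0 n1 1).foldl (fun acc j =>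
      (PySem.List.pyRange 0 n2 1).foldl (fun (acc : Int) k =>
        if PySem.List.pyGetD (PySem.List.pyGetD omega j []) k 0 != 0 then acc + 1 else acc) acc) 0)
    = ((((PySem.List.pyRange 0 n1 1).flatMap (fun j =>
        ((PySem.List.pyRange 0 n2 1).filter
            (fun k => PySem.List.pyGetD (PySem.List.pyGetD omega j []) k 0 != 0)).map
          (fun k => (j, k)))).length : Nat) : Int) := by
  have h1 : (fun (acc : Int) (j : Int) =>
      (PySem.List.pyRange 0 n2 1).foldl (fun (acc : Int) k =>
        if PySem.List.pyGetD (PySem.List.pyGetD omega j []) k 0 != 0 then acc + 1 else acc) acc)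
      = (fun (acc : Int) (j : Int) =>
        acc + ((((PySem.List.pyRange 0 n2 1).filter
            (fun k => PySem.List.pyGetD (PySem.List.pyGetD omega j []) k 0 != 0)).map
          (fun k => ((j : Int), k))).length : Int)) := by
    funext acc j
    rw [PySem.List.foldl_if_add_one]
    simp [List.countP_eq_length_filter]
  rw [h1, pv_sumlen (F := fun j => ((PySem.List.pyRange 0 n2 1).filter
        (fun k => PySem.List.pyGetD (PySem.List.pyGetD omega j []) k 0 != 0)).map (fun k => (j, k)))]
  simp

-- closed-form row_entries: floor division over a flat range recovers the repeated-row list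
lemma pv_rows_block (rank : Int) (hr : 0 < rank) (m : Nat) :
    (PySem.List.pyRange (2 * rank * m) (2 * rank * m + 2 * rank) 1).map
        (fun i => PySem.Int.floordiv i (2 * rank))
    = List.replicate (2 * rank).toNat (m : Int) := by
  rw [PySem.List.pyRange_one, List.map_map]
  rw [List.eq_replicate_iff]
  constructor
  · simp
  · intro b hb
    obtain ⟨t, ht, rfl⟩ := List.mem_map.mp hb
    have ht' : (t : Int) < 2 * rank := by
      have := List.mem_range.mp ht
      omega
    simp only [Function.comp]
    rw [PySem.Int.floordiv_eq_iff_of_pos (by omega)]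
    constructor <;> nlinarith [Int.natCast_nonneg t]

lemma pv_rows (rank : Int) (m : Nat) :
    (PySem.List.pyRange 0 (2 * rank * m) 1).map (fun i => PySem.Int.floordiv i (2 * rank))
    = (List.range m).flatMap (fun (q : Nat) => pvTwoRep rank (q : Int)) := by
  by_cases hr : rank ≤ 0
  · rw [PySem.List.pyRange_one_eq_nil (by nlinarith [Int.natCast_nonneg m])]
    have : ∀ q : Nat, pvTwoRep rank (q : Int) = [] := by
      intro q; simp [pvTwoRep, Int.toNat_of_nonpos hr]
    simp [List.flatMap_eq_nil_iff, this]
  · rw [not_le] at hr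
    induction m with
    | zero => simp
    | succ p ih =>
      have h0 : (0 : Int) ≤ 2 * rank * p := by positivity
      have hsplit : PySem.List.pyRange 0 (2 * rank * (p + 1 : Nat)) 1
          = PySem.List.pyRange 0 (2 * rank * p) 1
            ++ PySem.List.pyRange (2 * rank * p) (2 * rank * p + 2 * rank) 1 := by
        rw [PySem.List.pyRange_one_append 0 (2 * rank * p) _ h0 (by push_cast; nlinarith)]
        congr 1
        push_cast
        ring
      rw [hsplit, List.map_append, ih, pv_rows_block rank hr p, List.range_succ,
          List.flatMap_append, List.flatMap_singleton]
      congr 1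
      simp only [pvTwoRep, ← List.replicate_add]
      congr 1
      omega

-- closed-form columns: decoding a single 2*rank offset equals A's two contiguous blocks
lemma pv_cols_block (rank n2 j k : Int) :
    (PySem.List.pyRange 0 (2 * rank) 1).map
        (fun l => (if l < rank then k else n2 + j) * rank + PySem.Int.mod l rank)
    = pvBlockA rank n2 (j, k) := by
  by_cases hr : rank ≤ 0
  · simp [pvBlockA, PySem.List.pyRange_one_eq_nil (by omega : (2*rank : Int) ≤ 0),
      PySem.List.pyRange_one_eq_nil (by omega : (k*rank + rank : Int) ≤ k*rank),
      PySem.List.pyRange_one_eq_nil (by omega : ((n2+j)*rank + rank : Int) ≤ (n2+j)*rank)]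
  · rw [not_le] at hr
    rw [PySem.List.pyRange_one_append 0 rank (2 * rank) (by omega) (by omega), List.map_append]
    unfold pvBlockA
    congr 1
    · rw [PySem.List.pyRange_one 0 rank, PySem.List.pyRange_one (k * rank) (k * rank + rank),
        List.map_map, add_sub_cancel_left]
      simp only [Int.sub_zero]
      apply List.map_congr_left
      intro t ht
      have ht' : (t : Int) < rank := by
        have := List.mem_range.mp ht; omega
      simp only [Function.comp_apply, zero_add]
      rw [if_pos ht', PySem.Int.mod_eq_emod_of_pos hr,
        Int.emod_eq_of_lt (Int.natCast_nonneg t) ht']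
    · rw [PySem.List.pyRange_one rank (2 * rank),
        PySem.List.pyRange_one ((n2 + j) * rank) ((n2 + j) * rank + rank),
        List.map_map, add_sub_cancel_left]
      have h2 : (2 * rank - rank) = rank := by ring
      rw [h2]
      apply List.map_congr_left
      intro t ht
      have ht' : (t : Int) < rank := by
        have := List.mem_range.mp ht; omega
      simp only [Function.comp_apply]
      rw [if_neg (by omega), PySem.Int.mod_eq_emod_of_pos hr, Int.add_emod_left,
        Int.emod_eq_of_lt (Int.natCast_nonneg t) ht']

lemma pv_cols (omega : List (List Int)) (rank n1 n2 : Int) :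
    ((PySem.List.pyRange 0 n1 1).flatMap (fun j =>
      ((PySem.List.pyRange 0 n2 1).filter
          (fun k => PySem.List.pyGetD (PySem.List.pyGetD omega j []) k 0 != 0)).flatMap
        (fun k => (PySem.List.pyRange 0 (2 * rank) 1).map
          (fun l => (if l < rank then k else n2 + j) * rank + PySem.Int.mod l rank))))
    = ((PySem.List.pyRange 0 n1 1).flatMap (fun j =>
        ((PySem.List.pyRange 0 n2 1).filter
            (fun k => PySem.List.pyGetD (PySem.List.pyGetD omega j []) k 0 != 0)).map
          (fun k => (j, k)))).flatMap (pvBlockA rank n2) := by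
  rw [List.flatMap_assoc]
  apply List.flatMap_congr
  intro j _
  rw [List.flatMap_map]
  apply List.flatMap_congr
  intro k _
  exact pv_cols_block rank n2 j k

-- ===== VERDICT (by name: the statement is the Claim_ definition above) =====
theorem generate_sparse_matrix_entries_spec : Claim_equal_generate_sparse_matrix_entries := by
  intro omega rank n1 n2 _ _
  unfold Spec_generate_sparse_matrix_entries
  unfold generate_sparse_matrix_entries generate_sparse_matrix_entries_alt
  dsimp only
  rw [pv_A_eq_coords_fold, pv_fold_stepF, pv_count, pv_cols, pv_rows]
  simp only [List.nil_append, zero_add]
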